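-- pv_equiv track=rewrite | github.com/kingjooowon/toy_recommendation_engine | recommender.py | build_transition_table
-- ===== SOURCE A (Python) =====
-- def build_transition_table(sequences):
--     transition = {}
--
--     for seq in sequences.values():
--         for i in range((len(seq)) - 1):
--             current = seq[i]
--             next_event = seq[i+1]
--
--             if current not in transition:
--                 transition[current] = {}
--
--             if next_event not in transition[current]:
--                 transition[current][next_event] = 1
--             else:
--                 transition[current][next_event] += 1
--
--     return transition
-- ===== SOURCE B (Python) =====
-- def build_transition_table(sequences):
--     # Pass 1: flat counter of (current, next_event) pairs across all sequences.
--     flat = {}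
--     for seq in sequences.values():
--         for pair in zip(seq, seq[1:]):
--             flat[pair] = flat.get(pair, 0) + 1
--     # Pass 2: reshape the flat table into the nested dict.
--     result = {}
--     for (cur, nxt), cnt in flat.items():
--         result.setdefault(cur, {})[nxt] = cnt
--     return result
-- ===== Notes on version B (the rewrite author's own statement) =====
-- stated objective: alternative
-- what changed: Replaces A's single pass that populates the nested dict inline via index loops with two separate passes: one flat Counter-style table keyed by (current, next) pairs built with zip(seq, seq[1:]), then a reshaping pass over that table's items into the nested dict.
import Mathlib
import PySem

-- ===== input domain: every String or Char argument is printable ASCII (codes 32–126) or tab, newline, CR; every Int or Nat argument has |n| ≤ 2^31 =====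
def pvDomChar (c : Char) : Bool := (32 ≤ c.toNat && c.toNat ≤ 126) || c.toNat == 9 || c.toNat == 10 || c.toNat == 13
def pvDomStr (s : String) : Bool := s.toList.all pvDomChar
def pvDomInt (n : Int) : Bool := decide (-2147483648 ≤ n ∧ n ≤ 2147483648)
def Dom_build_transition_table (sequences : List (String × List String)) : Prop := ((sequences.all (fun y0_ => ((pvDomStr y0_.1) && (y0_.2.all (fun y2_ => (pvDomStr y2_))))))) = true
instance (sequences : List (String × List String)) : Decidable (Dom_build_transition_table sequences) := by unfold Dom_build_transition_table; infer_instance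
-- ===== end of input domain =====

-- B replaces A's single inline nested-dict pass with two passes: a flat (current, next) pair
-- counter over zip(seq, seq[1:]), then a reshaping pass into the nested dict (alternative
-- decomposition, same cost).

-- ===== PORT A =====
def build_transition_table (sequences : List (String × List String)) : List (String × List (String × Int)) :=
  let transition : PySem.Dict String (PySem.Dict String Int) :=
    ((PySem.Dict.ofList sequences).values).foldl
      (fun transition seq =>
        (PySem.List.pyRange 0 ((seq.length : Int) - 1) 1).foldl
          (fun transition i =>
            -- seq[i], seq[i+1]: i ∈ range(len(seq)-1), always in range, so pyGetD is exact
            let current := PySem.List.pyGetD seq i ""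
            let next_event := PySem.List.pyGetD seq (i + 1) ""
            let transition :=
              if transition.contains current then transition
              else transition.insert current PySem.Dict.empty
            if (transition.getD current PySem.Dict.empty).contains next_event = false then
              transition.insert current
                ((transition.getD current PySem.Dict.empty).insert next_event 1)
            else
              -- transition[current][next_event] += 1 : the key is present in this branch
              transition.insert current
                ((transition.getD current PySem.Dict.empty).insert next_event
                  ((transition.getD current PySem.Dict.empty).getD next_event 0 + 1)))
          transition)
      PySem.Dict.empty
  transition.items.map (fun p => (p.1, p.2.items))

-- ===== PORT B =====
def build_transition_table_alt (sequences : List (String × List String)) : List (String × List (String × Int)) :=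
  -- Pass 1: flat counter of (current, next_event) pairs across all sequences
  let flat : PySem.Dict (String × String) Int :=
    ((PySem.Dict.ofList sequences).values).foldl
      (fun flat seq =>
        (seq.zip (PySem.List.slice seq (some 1) none)).foldl
          (fun flat pair => flat.insert pair (flat.getD pair 0 + 1)) flat)
      PySem.Dict.empty
  -- Pass 2: reshape the flat table into the nested dict
  let result : PySem.Dict String (PySem.Dict String Int) :=
    flat.items.foldl
      (fun result q =>
        let r := result.setdefault q.1.1 PySem.Dict.empty
        r.insert q.1.1 ((r.getD q.1.1 PySem.Dict.empty).insert q.1.2 q.2))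
      PySem.Dict.empty
  result.items.map (fun p => (p.1, p.2.items))

-- ===== PRECONDITION & SPEC =====
def Spec_build_transition_table (sequences : List (String × List String)) (out : List (String × List (String × Int))) : Prop := out = build_transition_table_alt sequences
instance (sequences : List (String × List String)) (out : List (String × List (String × Int))) : Decidable (Spec_build_transition_table sequences out) := by unfold Spec_build_transition_table; infer_instance

-- ===== CLAIM (what is proved, stated in full; the proofs are below) =====
def Claim_equal_build_transition_table : Prop := ∀ (sequences : List (String × List String)), Dom_build_transition_table sequences → Spec_build_transition_table sequences (build_transition_table sequences)

-- ===== LEMMAS AND PROOFS =====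

-- Unified form of A's per-pair step ("nested bump")
def ub (t : PySem.Dict String (PySem.Dict String Int)) (p : String × String) :
    PySem.Dict String (PySem.Dict String Int) :=
  t.insert p.1 ((t.getD p.1 PySem.Dict.empty).insert p.2
    ((t.getD p.1 PySem.Dict.empty).getD p.2 0 + 1))

-- Unified form of B's reshape step
def sb (r : PySem.Dict String (PySem.Dict String Int)) (q : (String × String) × Int) :
    PySem.Dict String (PySem.Dict String Int) :=
  r.insert q.1.1 ((r.getD q.1.1 PySem.Dict.empty).insert q.1.2 q.2)

-- B's flat-counter step
def bf (d : PySem.Dict (String × String) Int) (p : String × String) :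
    PySem.Dict (String × String) Int :=
  d.insert p (d.getD p 0 + 1)

-- A's branched step is the unified bump
lemma stepA_eq (t : PySem.Dict String (PySem.Dict String Int)) (c n : String) :
    (let t' := if t.contains c then t else t.insert c PySem.Dict.empty
     if (t'.getD c PySem.Dict.empty).contains n = false then
       t'.insert c ((t'.getD c PySem.Dict.empty).insert n 1)
     else
       t'.insert c ((t'.getD c PySem.Dict.empty).insert n
         ((t'.getD c PySem.Dict.empty).getD n 0 + 1))) = ub t (c, n) := by
  by_cases hc : t.contains c
  · simp only [hc, if_true]
    by_cases hn : (t.getD c PySem.Dict.empty).contains n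
    · simp [hn]
      rfl
    · have h0 : (t.getD c PySem.Dict.empty).getD n 0 = 0 :=
        PySem.Dict.getD_of_not_contains (t.getD c PySem.Dict.empty) 0 (by simpa using hn)
      simp [hn, ub, h0]
  · have hcf : t.contains c = false := by simpa using hc
    have h1 : t.getD c PySem.Dict.empty = PySem.Dict.empty :=
      PySem.Dict.getD_of_not_contains t PySem.Dict.empty hcf
    simp [hc, ub, h1, PySem.Dict.getD_insert_self, PySem.Dict.insert_insert_self,
      PySem.Dict.getD_empty, PySem.Dict.contains_empty]

-- B's setdefault step is the unified reshape step
lemma stepB_eq (r : PySem.Dict String (PySem.Dict String Int)) (q : (String × String) × Int) :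
    (let r' := r.setdefault q.1.1 PySem.Dict.empty
     r'.insert q.1.1 ((r'.getD q.1.1 PySem.Dict.empty).insert q.1.2 q.2)) = sb r q := by
  by_cases hc : r.contains q.1.1
  · rw [PySem.Dict.setdefault_of_contains r PySem.Dict.empty hc]
    rfl
  · have hcf : r.contains q.1.1 = false := by simpa using hc
    rw [PySem.Dict.setdefault_of_not_contains r PySem.Dict.empty hcf]
    have h1 : r.getD q.1.1 PySem.Dict.empty = PySem.Dict.empty :=
      PySem.Dict.getD_of_not_contains r PySem.Dict.empty hcf
    simp [sb, PySem.Dict.getD_insert_self, PySem.Dict.insert_insert_self, h1]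

-- A's index loop over range(len(seq)-1) is a fold over adjacent pairs (Nat level)
lemma foldl_range_pairs_nat {σ : Type} (f : σ → String × String → σ) :
    ∀ (seq : List String) (init : σ),
      (List.range (seq.length - 1)).foldl
        (fun t k => f t (seq.getD k "", seq.getD (k + 1) "")) init
      = (seq.zip seq.tail).foldl f init := by
  intro seq
  induction seq with
  | nil => intro init; rfl
  | cons x xs ih =>
    cases xs with
    | nil => intro init; rfl
    | cons y rest =>
      intro init
      have hlen : (x :: y :: rest).length - 1 = ((y :: rest).length - 1) + 1 := by
        simp
      rw [hlen, List.range_succ_eq_map]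
      simp only [List.foldl_cons, List.foldl_map, List.getD_cons_zero, List.getD_cons_succ]
      rw [show ((x :: y :: rest).zip (x :: y :: rest).tail).foldl f init
            = ((y :: rest).zip (y :: rest).tail).foldl f (f init (x, y)) by
        simp [List.zip_cons_cons]]
      exact ih (f init (x, y))

-- the same, at Python's Int-indexed range
lemma foldl_range_pairs {σ : Type} (f : σ → String × String → σ) (seq : List String) (init : σ) :
    (PySem.List.pyRange 0 ((seq.length : Int) - 1) 1).foldl
      (fun t i => f t (PySem.List.pyGetD seq i "", PySem.List.pyGetD seq (i + 1) "")) init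
    = (seq.zip seq.tail).foldl f init := by
  have h0 : (((seq.length : Int) - 1) - 0).toNat = seq.length - 1 := by omega
  rw [PySem.List.pyRange_one, h0, List.foldl_map]
  simp only [zero_add, ← Nat.cast_add_one, PySem.List.pyGetD_natCast]
  exact foldl_range_pairs_nat f seq init

-- a fold of per-sequence folds = one fold over the concatenation of the pair lists
lemma foldl_zip_flat {α σ : Type} (f : σ → α → σ) (g : List String → List α) :
    ∀ (vals : List (List String)) (init : σ),
      vals.foldl (fun t seq => (g seq).foldl f t) init
      = ((vals.map g).flatMap id).foldl f init := by
  intro vals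
  induction vals with
  | nil => intro init; rfl
  | cons x xs ih => intro init; simp [List.foldl_append, ih]

-- lookup in A's nested fold counts occurrences of the pair
lemma ub_lookup :
    ∀ (P : List (String × String)) (r : PySem.Dict String (PySem.Dict String Int)) (c n : String),
      (((P.foldl ub r).getD c PySem.Dict.empty).getD n 0)
      = ((r.getD c PySem.Dict.empty).getD n 0) + P.count (c, n) := by
  intro P
  induction P with
  | nil => simp
  | cons q P ih =>
    intro r c n
    rcases q with ⟨c', n'⟩
    simp only [List.foldl_cons, ih]
    have hstep : (((ub r (c', n')).getD c PySem.Dict.empty).getD n 0)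
        = ((r.getD c PySem.Dict.empty).getD n 0) + (if (c, n) = (c', n') then 1 else 0) := by
      by_cases h1 : c = c'
      · subst h1
        rw [show ub r (c, n') = r.insert c ((r.getD c PySem.Dict.empty).insert n'
              ((r.getD c PySem.Dict.empty).getD n' 0 + 1)) from rfl,
            PySem.Dict.getD_insert_self]
        by_cases h2 : n = n'
        · subst h2; simp [PySem.Dict.getD_insert_self]
        · rw [PySem.Dict.getD_insert_of_ne _ _ _ h2]
          simp [h2]
      · rw [show ub r (c', n') = r.insert c' ((r.getD c' PySem.Dict.empty).insert n'
              ((r.getD c' PySem.Dict.empty).getD n' 0 + 1)) from rfl,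
            PySem.Dict.getD_insert_of_ne _ _ _ h1]
        simp [h1]
    rw [hstep]
    have hiff : (if ((c', n') == (c, n)) = true then 1 else 0) = (if (c, n) = (c', n') then (1 : Nat) else 0) := by
      by_cases he : (c, n) = (c', n')
      · simp [he]
      · have he' : ¬ (c', n') = (c, n) := fun h => he h.symm
        simp [he, he']
    rw [List.count_cons, hiff]
    by_cases he : (c, n) = (c', n')
    · rw [if_pos he, if_pos he]; push_cast; ring
    · rw [if_neg he, if_neg he]; push_cast; ring

-- two inserts at different keys commute when the second key is already present
lemma insert_comm_of_contains {κ ν : Type} [BEq κ] [LawfulBEq κ]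
    (d : PySem.Dict κ ν) (c c' : κ) (B A : ν)
    (hc : d.contains c = true) (hne : c ≠ c') :
    (d.insert c' A).insert c B = (d.insert c B).insert c' A := by
  apply PySem.Dict.ext
  have hcne : (c == c') = false := by simpa using hne
  have hc'ne : (c' == c) = false := by simp; exact fun h => hne h.symm
  by_cases hc' : d.contains c'
  · rw [PySem.Dict.items_insert_of_contains _ B (by simp [PySem.Dict.contains_insert, hc]),
        PySem.Dict.items_insert_of_contains _ A hc',
        PySem.Dict.items_insert_of_contains _ A (by simp [PySem.Dict.contains_insert, hc']),
        PySem.Dict.items_insert_of_contains _ B hc,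
        List.map_map, List.map_map]
    apply List.map_congr_left
    intro q _
    by_cases h1 : q.1 = c' <;> by_cases h2 : q.1 = c <;>
      simp_all [Function.comp]
  · have hc'f : d.contains c' = false := by simpa using hc'
    rw [PySem.Dict.items_insert_of_contains _ B (by simp [PySem.Dict.contains_insert, hc]),
        PySem.Dict.items_insert_of_not_contains _ A hc'f,
        PySem.Dict.items_insert_of_not_contains _ A
          (by simp [PySem.Dict.contains_insert, hc'f, hc'ne]),
        PySem.Dict.items_insert_of_contains _ B hc,
        List.map_append]
    simp [hc'ne]

-- the nested bump at p commutes with a reshape step at a different key,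
-- provided p is already present (outer and inner)
lemma ub_sb_comm (r : PySem.Dict String (PySem.Dict String Int))
    (p : String × String) (q : (String × String) × Int)
    (hne : q.1 ≠ p) (hc : r.contains p.1 = true)
    (hn : (r.getD p.1 PySem.Dict.empty).contains p.2 = true) :
    ub (sb r q) p = sb (ub r p) q := by
  rcases p with ⟨c, n⟩
  rcases q with ⟨⟨c', n'⟩, v'⟩
  by_cases h1 : c' = c
  · subst h1
    have hnn : n' ≠ n := by
      intro h; exact hne (by simp [h])
    simp only [ub, sb]
    rw [PySem.Dict.getD_insert_self, PySem.Dict.getD_insert_self,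
        PySem.Dict.getD_insert_of_ne _ _ _ (fun h => hnn h.symm),
        PySem.Dict.insert_insert_self, PySem.Dict.insert_insert_self]
    exact congrArg _ (insert_comm_of_contains _ _ _ _ _ hn (fun h => hnn h.symm))
  · simp only [ub, sb]
    rw [PySem.Dict.getD_insert_of_ne _ _ _ (fun h : c = c' => h1 h.symm),
        PySem.Dict.getD_insert_of_ne _ _ _ h1]
    exact insert_comm_of_contains _ _ _ _ _ hc (fun h : c = c' => h1 h.symm)

-- sb preserves presence of an outer key and of an inner key under it
lemma sb_preserves (r : PySem.Dict String (PySem.Dict String Int))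
    (p : String × String) (q : (String × String) × Int)
    (hc : r.contains p.1 = true)
    (hn : (r.getD p.1 PySem.Dict.empty).contains p.2 = true) :
    (sb r q).contains p.1 = true ∧
      ((sb r q).getD p.1 PySem.Dict.empty).contains p.2 = true := by
  constructor
  · simp [sb, PySem.Dict.contains_insert, hc]
  · simp only [sb]
    by_cases h1 : p.1 = q.1.1
    · rw [h1, PySem.Dict.getD_insert_self]
      by_cases h2 : p.2 = q.1.2
      · simp [h2]
      · rw [← h1]
        simp [PySem.Dict.contains_insert, hn]
    · rw [PySem.Dict.getD_insert_of_ne _ _ _ h1]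
      exact hn

-- bump commutes past a whole reshape run avoiding p's key
lemma ub_foldl_sb_comm (p : String × String) :
    ∀ (rest : List ((String × String) × Int)) (r : PySem.Dict String (PySem.Dict String Int)),
      (∀ q ∈ rest, q.1 ≠ p) → r.contains p.1 = true →
      (r.getD p.1 PySem.Dict.empty).contains p.2 = true →
      ub (rest.foldl sb r) p = rest.foldl sb (ub r p) := by
  intro rest
  induction rest with
  | nil => intro r _ _ _; rfl
  | cons q rest ih =>
    intro r hall hc hn
    simp only [List.foldl_cons]
    obtain ⟨hc', hn'⟩ := sb_preserves r p q hc hn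
    rw [ih (sb r q) (fun q' h => hall q' (List.mem_cons_of_mem _ h)) hc' hn',
        ub_sb_comm r p q (hall q List.mem_cons_self) hc hn]

-- bumping an existing entry of the flat table = bumping the reshaped nested table
lemma reshape_update (p : String × String) (w : Int) :
    ∀ (l : List ((String × String) × Int)) (r : PySem.Dict String (PySem.Dict String Int)),
      (l.map (·.1)).Nodup → (p, w) ∈ l →
      (l.map (fun q => if q.1 == p then (p, w + 1) else q)).foldl sb r
      = ub (l.foldl sb r) p := by
  intro l
  induction l with
  | nil => intro r _ hmem; exact absurd hmem (List.not_mem_nil)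
  | cons q l ih =>
    intro r hnd hmem
    rw [List.map_cons] at hnd
    obtain ⟨hnotin, hndtail⟩ := List.nodup_cons.mp hnd
    by_cases hq : q.1 = p
    · have hpnotin : p ∉ l.map (·.1) := hq ▸ hnotin
      have hq2 : q = (p, w) := by
        rcases List.mem_cons.mp hmem with h | h
        · exact h.symm
        · exact absurd (List.mem_map_of_mem (f := (·.1)) h) hpnotin
      subst hq2
      simp only [List.map_cons, List.foldl_cons, beq_self_eq_true, if_true]
      have hmapid : l.map (fun q' => if q'.1 == p then (p, w + 1) else q') = l := by
        have h1 : ∀ q' ∈ l, (if q'.1 == p then (p, w + 1) else q') = id q' := by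
          intro q' h'
          have hne : q'.1 ≠ p := by
            intro e
            have hm : q'.1 ∈ l.map (·.1) := List.mem_map_of_mem h'
            rw [e] at hm
            exact hpnotin hm
          simp [hne]
        exact (List.map_congr_left h1).trans (List.map_id l)
      rw [hmapid]
      have hall : ∀ q' ∈ l, q'.1 ≠ (p, w).1 := by
        intro q' h' e
        have hm : q'.1 ∈ l.map (·.1) := List.mem_map_of_mem h'
        rw [e] at hm
        exact hpnotin hm
      have hub : ub (sb r ((p, w).1, w)) (p, w).1 = sb r ((p, w).1, w + 1) := by
        simp only [ub, sb]
        rw [PySem.Dict.getD_insert_self, PySem.Dict.getD_insert_self,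
            PySem.Dict.insert_insert_self, PySem.Dict.insert_insert_self]
      rw [← hub]
      rw [ub_foldl_sb_comm (p, w).1 l (sb r ((p, w).1, w)) hall
            (by simp [sb, PySem.Dict.contains_insert_self])
            (by simp only [sb]; rw [PySem.Dict.getD_insert_self]
                exact PySem.Dict.contains_insert_self _ _ _)]
    · have hbq : (q.1 == p) = false := by simpa using hq
      simp only [List.map_cons, List.foldl_cons, hbq, Bool.false_eq_true, if_false]
      have hmem' : (p, w) ∈ l := by
        rcases List.mem_cons.mp hmem with h | h
        · exact absurd (congrArg Prod.fst h.symm) hq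
        · exact h
      exact ih (sb r q) hndtail hmem'

-- MAIN: reshaping the flat pair-counter = A's inline nested fold
lemma reshape_eq_nested (P : List (String × String)) :
    ((P.foldl bf PySem.Dict.empty).items).foldl sb PySem.Dict.empty
    = P.foldl ub PySem.Dict.empty := by
  induction P using List.reverseRecOn with
  | nil => rfl
  | append_singleton P p ih =>
    simp only [List.foldl_append, List.foldl_cons, List.foldl_nil]
    by_cases hp : (P.foldl bf PySem.Dict.empty).contains p
    · obtain ⟨w, hw⟩ : ∃ w, (P.foldl bf PySem.Dict.empty).get? p = some w := by
        have := PySem.Dict.contains_eq_isSome_get? (P.foldl bf PySem.Dict.empty) p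
        rw [hp] at this
        exact Option.isSome_iff_exists.mp this.symm
      have hgd : (P.foldl bf PySem.Dict.empty).getD p 0 = w :=
        PySem.Dict.getD_of_get?_eq_some _ 0 hw
      have hmem : (p, w) ∈ (P.foldl bf PySem.Dict.empty).items :=
        PySem.Dict.mem_items_of_get?_eq_some _ hw
      have hnd : ((P.foldl bf PySem.Dict.empty).items.map (·.1)).Nodup :=
        PySem.Dict.nodup_keys_foldl_insert P (fun d x => d.getD x 0 + 1) PySem.Dict.empty
          PySem.Dict.nodup_keys_empty
      rw [show bf (P.foldl bf PySem.Dict.empty) p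
            = (P.foldl bf PySem.Dict.empty).insert p ((P.foldl bf PySem.Dict.empty).getD p 0 + 1)
          from rfl, hgd,
          PySem.Dict.items_insert_of_contains _ (w + 1) hp]
      rw [show (fun q => if (q.1 == p) = true then (p, w + 1) else q)
            = (fun q : (String × String) × Int => if q.1 == p then (p, w + 1) else q) from rfl]
      rw [reshape_update p w _ PySem.Dict.empty hnd hmem, ih]
    · have hpf : (P.foldl bf PySem.Dict.empty).contains p = false := by simpa using hp
      have h0 : (P.foldl bf PySem.Dict.empty).getD p 0 = 0 :=
        PySem.Dict.getD_of_not_contains _ 0 hpf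
      have hcnt : P.count p = 0 := by
        have := PySem.Dict.getD_foldl_insert_add_one P PySem.Dict.empty p
        rw [show (P.foldl (fun d x => d.insert x (d.getD x 0 + 1)) PySem.Dict.empty)
              = P.foldl bf PySem.Dict.empty from rfl, h0, PySem.Dict.getD_empty] at this
        omega
      rw [show bf (P.foldl bf PySem.Dict.empty) p
            = (P.foldl bf PySem.Dict.empty).insert p ((P.foldl bf PySem.Dict.empty).getD p 0 + 1)
          from rfl, h0,
          PySem.Dict.items_insert_of_not_contains _ (0 + 1) hpf,
          List.foldl_append]
      simp only [List.foldl_cons, List.foldl_nil]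
      rw [ih]
      have hx : (((P.foldl ub PySem.Dict.empty).getD p.1 PySem.Dict.empty).getD p.2 0) = 0 := by
        rw [ub_lookup P PySem.Dict.empty p.1 p.2, PySem.Dict.getD_empty, PySem.Dict.getD_empty]
        simp [hcnt]
      simp only [ub, sb, hx]

-- ===== VERDICT (by name: the statement is the Claim_ definition above) =====
theorem build_transition_table_spec : Claim_equal_build_transition_table := by
  intro sequences _
  show build_transition_table sequences = build_transition_table_alt sequences
  suffices h : ∀ vals : List (List String),
      vals.foldl
        (fun (transition : PySem.Dict String (PySem.Dict String Int)) (seq : List String) =>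
          (PySem.List.pyRange 0 ((seq.length : Int) - 1) 1).foldl
            (fun transition i =>
              let current := PySem.List.pyGetD seq i ""
              let next_event := PySem.List.pyGetD seq (i + 1) ""
              let transition :=
                if transition.contains current then transition
                else transition.insert current PySem.Dict.empty
              if (transition.getD current PySem.Dict.empty).contains next_event = false then
                transition.insert current
                  ((transition.getD current PySem.Dict.empty).insert next_event 1)
              else
                transition.insert current
                  ((transition.getD current PySem.Dict.empty).insert next_event
                    ((transition.getD current PySem.Dict.empty).getD next_event 0 + 1)))
            transition)
        PySem.Dict.empty
      = ((vals.foldl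
            (fun (flat : PySem.Dict (String × String) Int) (seq : List String) =>
              (seq.zip (PySem.List.slice seq (some 1) none)).foldl
                (fun flat pair => flat.insert pair (flat.getD pair 0 + 1)) flat)
            PySem.Dict.empty).items).foldl
          (fun (result : PySem.Dict String (PySem.Dict String Int))
              (q : (String × String) × Int) =>
            let r := result.setdefault q.1.1 PySem.Dict.empty
            r.insert q.1.1 ((r.getD q.1.1 PySem.Dict.empty).insert q.1.2 q.2))
          PySem.Dict.empty by
    have h2 := congrArg
      (fun d : PySem.Dict String (PySem.Dict String Int) =>
        d.items.map (fun p => (p.1, p.2.items)))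
      (h ((PySem.Dict.ofList sequences).values))
    exact h2
  intro vals
  -- A side: per-sequence index loop = fold of the unified bump over adjacent pairs
  have hA : (fun (transition : PySem.Dict String (PySem.Dict String Int)) (seq : List String) =>
      (PySem.List.pyRange 0 ((seq.length : Int) - 1) 1).foldl
        (fun transition i =>
          let current := PySem.List.pyGetD seq i ""
          let next_event := PySem.List.pyGetD seq (i + 1) ""
          let transition :=
            if transition.contains current then transition
            else transition.insert current PySem.Dict.empty
          if (transition.getD current PySem.Dict.empty).contains next_event = false then
            transition.insert current
              ((transition.getD current PySem.Dict.empty).insert next_event 1)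
          else
            transition.insert current
              ((transition.getD current PySem.Dict.empty).insert next_event
                ((transition.getD current PySem.Dict.empty).getD next_event 0 + 1)))
        transition)
      = (fun t seq => (seq.zip seq.tail).foldl ub t) := by
    funext t seq
    rw [show (fun (transition : PySem.Dict String (PySem.Dict String Int)) (i : Int) =>
          let current := PySem.List.pyGetD seq i ""
          let next_event := PySem.List.pyGetD seq (i + 1) ""
          let transition :=
            if transition.contains current then transition
            else transition.insert current PySem.Dict.empty
          if (transition.getD current PySem.Dict.empty).contains next_event = false then
            transition.insert current
              ((transition.getD current PySem.Dict.empty).insert next_event 1)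
          else
            transition.insert current
              ((transition.getD current PySem.Dict.empty).insert next_event
                ((transition.getD current PySem.Dict.empty).getD next_event 0 + 1)))
        = (fun t i => ub t (PySem.List.pyGetD seq i "", PySem.List.pyGetD seq (i + 1) ""))
      from funext fun t => funext fun i =>
        stepA_eq t (PySem.List.pyGetD seq i "") (PySem.List.pyGetD seq (i + 1) "")]
    exact foldl_range_pairs ub seq t
  -- B side: seq[1:] is the tail, the flat step is bf, the reshape step is sb
  have hB1 : (fun (flat : PySem.Dict (String × String) Int) (seq : List String) =>
      (seq.zip (PySem.List.slice seq (some 1) none)).foldl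
        (fun flat pair => flat.insert pair (flat.getD pair 0 + 1)) flat)
      = (fun f seq => (seq.zip seq.tail).foldl bf f) := by
    funext f seq
    rw [PySem.List.slice_from_one]
    rfl
  have hB2 : (fun (result : PySem.Dict String (PySem.Dict String Int))
      (q : (String × String) × Int) =>
        let r := result.setdefault q.1.1 PySem.Dict.empty
        r.insert q.1.1 ((r.getD q.1.1 PySem.Dict.empty).insert q.1.2 q.2)) = sb :=
    funext fun r => funext fun q => stepB_eq r q
  -- chain everything by congruence (no pattern matching on the big lambdas)
  have G1 := congrArg
    (fun F : PySem.Dict String (PySem.Dict String Int) → List String →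
        PySem.Dict String (PySem.Dict String Int) =>
      List.foldl F PySem.Dict.empty vals) hA
  have G3 := foldl_zip_flat ub (fun seq => seq.zip seq.tail) vals PySem.Dict.empty
  have G4 := foldl_zip_flat bf (fun seq => seq.zip seq.tail) vals PySem.Dict.empty
  have G2a := congrArg
    (fun d : PySem.Dict (String × String) Int =>
      List.foldl
        (fun (result : PySem.Dict String (PySem.Dict String Int))
            (q : (String × String) × Int) =>
          let r := result.setdefault q.1.1 PySem.Dict.empty
          r.insert q.1.1 ((r.getD q.1.1 PySem.Dict.empty).insert q.1.2 q.2))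
        PySem.Dict.empty d.items)
    (congrArg
      (fun F : PySem.Dict (String × String) Int → List String →
          PySem.Dict (String × String) Int =>
        List.foldl F PySem.Dict.empty vals) hB1)
  have G2b := congrArg
    (fun R : PySem.Dict String (PySem.Dict String Int) → ((String × String) × Int) →
        PySem.Dict String (PySem.Dict String Int) =>
      List.foldl R PySem.Dict.empty
        ((List.foldl (fun f seq => (seq.zip seq.tail).foldl bf f)
          PySem.Dict.empty vals).items)) hB2
  have G5 := congrArg
    (fun d : PySem.Dict (String × String) Int =>
      List.foldl sb PySem.Dict.empty d.items) G4.symm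
  exact G1.trans (G3.trans
    ((reshape_eq_nested ((vals.map (fun seq => seq.zip seq.tail)).flatMap id)).symm.trans
      (G5.trans (G2a.trans G2b).symm)))
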